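-- pv_equiv track=rewrite | github.com/KhouloudSassiKs/optimisations-complexity-python | 2letter-combo-count.py | solution
-- ===== SOURCE A (Python) =====
-- def solution(s):
--     """
--     Count the total number of 3-letter combinations from the string `s`
--     where exactly two letters are identical and the third is different.
--
--     Args:
--         s (str): Input string.
--
--     Returns:
--         int: Total number of valid 3-letter combinations.
--     """
--     # Count occurrences of each letter
--     letter_count = {}
--     for letter in s:
--         letter_count[letter] = letter_count.get(letter, 0) + 1
--
--     letters = list(letter_count.keys())
--     output = 0
--
--     # Loop over all pairs of distinct letters
--     for i in range(len(letters)):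
--         for j in range(i + 1, len(letters)):
--             a, b = letters[i], letters[j]
--             count_a, count_b = letter_count[a], letter_count[b]
--
--             # Two a's + one b
--             if count_a >= 2:
--                 output += (count_a * (count_a - 1) // 2) * count_b
--             # Two b's + one a
--             if count_b >= 2:
--                 output += (count_b * (count_b - 1) // 2) * count_a
--
--     return output
-- ===== SOURCE B (Python) =====
-- def solution(s):
--     """
--     Count the total number of 3-letter combinations from the string `s`
--     where exactly two letters are identical and the third is different.
--     One pass over the letter counts: each letter with count c contributes
--     C(c, 2) pairs of identical letters times (len(s) - c) choices of a
--     different third letter.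
--     """
--     counts = {}
--     for letter in s:
--         counts[letter] = counts.get(letter, 0) + 1
--     total = len(s)
--     output = 0
--     for c in counts.values():
--         output += c * (c - 1) // 2 * (total - c)
--     return output
-- ===== Notes on version B (the rewrite author's own statement) =====
-- stated objective: simpler
-- what changed: Replaced the double loop over all pairs of distinct letters by a single pass over the letter counts summing C(c,2)*(len(s)-c) per letter.
import Mathlib
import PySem

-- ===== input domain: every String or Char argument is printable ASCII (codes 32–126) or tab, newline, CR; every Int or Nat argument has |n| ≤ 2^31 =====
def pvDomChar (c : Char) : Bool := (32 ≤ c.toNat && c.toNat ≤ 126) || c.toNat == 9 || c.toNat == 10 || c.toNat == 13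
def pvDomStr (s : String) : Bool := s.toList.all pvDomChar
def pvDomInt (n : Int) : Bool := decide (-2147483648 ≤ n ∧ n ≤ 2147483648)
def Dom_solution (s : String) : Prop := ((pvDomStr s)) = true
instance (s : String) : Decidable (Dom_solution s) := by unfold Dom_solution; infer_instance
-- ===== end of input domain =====

-- B replaces A's double loop over pairs of distinct letters by a simpler single pass
-- summing C(c,2)*(len(s)-c) per letter count.

-- ===== PORT A =====
def solution (s : String) : Int :=
  let letterCount : PySem.Dict Char Int :=
    s.toList.foldl (fun d letter => d.insert letter (d.getD letter 0 + 1)) PySem.Dict.empty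
  let letters : List Char := letterCount.keys
  (PySem.List.pyRange 0 (PySem.List.len letters) 1).foldl (fun output i =>
    (PySem.List.pyRange (i + 1) (PySem.List.len letters) 1).foldl (fun output j =>
      let a := PySem.List.pyGetD letters i ' '   -- letters[i], always in range
      let b := PySem.List.pyGetD letters j ' '   -- letters[j], always in range
      let count_a := letterCount.getD a 0        -- letter_count[a], key always present
      let count_b := letterCount.getD b 0        -- letter_count[b], key always present
      let output := if 2 ≤ count_a then output + PySem.Int.floordiv (count_a * (count_a - 1)) 2 * count_b else output
      if 2 ≤ count_b then output + PySem.Int.floordiv (count_b * (count_b - 1)) 2 * count_a else output)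
      output) 0

-- ===== PORT B =====
def solution_alt (s : String) : Int :=
  let counts : PySem.Dict Char Int :=
    s.toList.foldl (fun d letter => d.insert letter (d.getD letter 0 + 1)) PySem.Dict.empty
  let total : Int := PySem.Str.len s
  counts.values.foldl (fun output c => output + PySem.Int.floordiv (c * (c - 1)) 2 * (total - c)) 0

-- ===== PRECONDITION & SPEC =====
def Spec_solution (s : String) (out : Int) : Prop := out = solution_alt s
instance (s : String) (out : Int) : Decidable (Spec_solution s out) := by unfold Spec_solution; infer_instance

-- ===== CLAIM (what is proved, stated in full; the proofs are below) =====
def Claim_equal_solution : Prop := ∀ (s : String), Dom_solution s → Spec_solution s (solution s)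

-- ===== LEMMAS AND PROOFS =====

-- sum of f over all ordered pairs (earlier element, later element) of a list
def pvPairSum {α : Type} (f : α → α → Int) : List α → Int
  | [] => 0
  | x :: t => (t.map (f x)).sum + pvPairSum f t

theorem pvPairSum_append {α : Type} (f : α → α → Int) (ks : List α) (x : α) :
    pvPairSum f (ks ++ [x]) = pvPairSum f ks + (ks.map (fun k => f k x)).sum := by
  induction ks with
  | nil => simp [pvPairSum]
  | cons y t ih => simp [pvPairSum, ih]; ring

theorem pvGetD_append_lt {α : Type} (ks : List α) (x d : α) {i : Int}
    (h0 : 0 ≤ i) (h1 : i < (ks.length : Int)) :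
    PySem.List.pyGetD (ks ++ [x]) i d = PySem.List.pyGetD ks i d := by
  rw [PySem.List.pyGetD_eq_getElem _ d h0 (by simp; omega),
      PySem.List.pyGetD_eq_getElem _ d h0 h1]
  exact List.getElem_append_left (by omega)

theorem pvGetD_append_len {α : Type} (ks : List α) (x d : α) :
    PySem.List.pyGetD (ks ++ [x]) (ks.length : Int) d = x := by
  rw [PySem.List.pyGetD_eq_getElem _ d (by positivity) (by simp)]
  simp

-- the index double-loop sum equals the structural pairwise sum
theorem pvSum_eq {α : Type} (f : α → α → Int) (d : α) (ks : List α) :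
    ((PySem.List.pyRange 0 (PySem.List.len ks) 1).map (fun i =>
      ((PySem.List.pyRange (i + 1) (PySem.List.len ks) 1).map (fun j =>
        f (PySem.List.pyGetD ks i d) (PySem.List.pyGetD ks j d))).sum)).sum
    = pvPairSum f ks := by
  induction ks using List.reverseRecOn with
  | nil => simp [pvPairSum, PySem.List.len, PySem.List.pyRange_one_eq_nil]
  | append_singleton ks x ih =>
    rw [pvPairSum_append, ← ih]
    have hlen : PySem.List.len (ks ++ [x]) = PySem.List.len ks + 1 := by
      simp [PySem.List.len_eq]
    have hn : (0:Int) ≤ PySem.List.len ks := by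
      rw [PySem.List.len_eq]; exact Int.natCast_nonneg _
    rw [hlen, PySem.List.pyRange_one_succ_right hn]
    rw [List.map_append, List.sum_append]
    -- the trailing i = len ks term
    have hlast : ((PySem.List.pyRange (PySem.List.len ks + 1) (PySem.List.len ks + 1) 1).map (fun j =>
        f (PySem.List.pyGetD (ks ++ [x]) (PySem.List.len ks) d) (PySem.List.pyGetD (ks ++ [x]) j d))).sum = 0 := by
      rw [PySem.List.pyRange_one_eq_nil le_rfl]; simp
    have hcongr : ∀ i ∈ PySem.List.pyRange 0 (PySem.List.len ks) 1,
        ((PySem.List.pyRange (i + 1) (PySem.List.len ks + 1) 1).map (fun j =>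
          f (PySem.List.pyGetD (ks ++ [x]) i d) (PySem.List.pyGetD (ks ++ [x]) j d))).sum
        = ((PySem.List.pyRange (i + 1) (PySem.List.len ks) 1).map (fun j =>
          f (PySem.List.pyGetD ks i d) (PySem.List.pyGetD ks j d))).sum
          + f (PySem.List.pyGetD ks i d) x := by
      intro i hi
      rw [PySem.List.mem_pyRange_one] at hi
      rw [PySem.List.len_eq] at hi
      have hgi : PySem.List.pyGetD (ks ++ [x]) i d = PySem.List.pyGetD ks i d :=
        pvGetD_append_lt ks x d hi.1 hi.2
      have hstep : PySem.List.pyRange (i + 1) (PySem.List.len ks + 1) 1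
          = PySem.List.pyRange (i + 1) (PySem.List.len ks) 1 ++ [PySem.List.len ks] := by
        apply PySem.List.pyRange_one_succ_right
        rw [PySem.List.len_eq]; omega
      rw [hstep, List.map_append, List.sum_append, hgi]
      congr 1
      · congr 1
        apply List.map_congr_left
        intro j hj
        rw [PySem.List.mem_pyRange_one, PySem.List.len_eq] at hj
        rw [pvGetD_append_lt ks x d (by omega) hj.2]
      · simp [pvGetD_append_len ks x d]
    rw [List.map_congr_left hcongr]
    rw [PySem.List.sum_map_add_int]
    simp only [List.map_singleton, List.sum_cons, List.sum_nil]
    rw [show ((PySem.List.pyRange (PySem.List.len ks + 1) (PySem.List.len ks + 1) 1).map (fun j =>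
        f (PySem.List.pyGetD (ks ++ [x]) (PySem.List.len ks) d) (PySem.List.pyGetD (ks ++ [x]) j d))).sum = 0 from hlast]
    have hmapH : (PySem.List.pyRange 0 (PySem.List.len ks) 1).map (fun i => f (PySem.List.pyGetD ks i d) x)
        = ks.map (fun k => f k x) := by
      rw [show (fun i => f (PySem.List.pyGetD ks i d) x)
            = ((fun k => f k x) ∘ (fun i => PySem.List.pyGetD ks i d)) from rfl,
          ← List.map_map, PySem.List.map_pyGetD_pyRange_zero]
    rw [hmapH]
    ring

-- fold form of the double loop
theorem pvLoop_eq_pairSum {α : Type} (f : α → α → Int) (d : α) (ks : List α) :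
    (PySem.List.pyRange 0 (PySem.List.len ks) 1).foldl (fun o i =>
      (PySem.List.pyRange (i + 1) (PySem.List.len ks) 1).foldl (fun o j =>
        o + f (PySem.List.pyGetD ks i d) (PySem.List.pyGetD ks j d)) o) 0
    = pvPairSum f ks := by
  simp only [PySem.List.foldl_add]
  rw [zero_add]
  exact pvSum_eq f d ks

-- pairwise sum of the symmetric combination in closed form
theorem pvPairSum_counts {α : Type} (g c : α → Int) (ks : List α) :
    pvPairSum (fun a b => g a * c b + g b * c a) ks
    = (ks.map (fun k => g k * ((ks.map c).sum - c k))).sum := by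
  induction ks with
  | nil => simp [pvPairSum]
  | cons x t ih =>
    simp only [pvPairSum, List.map_cons, List.sum_cons, ih]
    rw [PySem.List.sum_map_add_int t (fun b => g x * c b) (fun b => g b * c x),
        PySem.List.sum_map_const_mul_int, List.sum_map_mul_right]
    rw [List.map_congr_left (l := t)
      (f := fun k => g k * (c x + (t.map c).sum - c k))
      (g := fun k => g k * ((t.map c).sum - c k) + g k * c x) (by intro k _; ring)]
    rw [PySem.List.sum_map_add_int, List.sum_map_mul_right]
    ring

-- the distinct elements' counts sum to the length
theorem pvSumCounts {α : Type} [DecidableEq α] (xs ks : List α)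
    (hnd : ks.Nodup) (hmem : ∀ x ∈ xs, x ∈ ks) :
    (ks.map (fun k => ((xs.count k : Nat) : Int))).sum = (xs.length : Int) := by
  induction xs with
  | nil => simp
  | cons x t ih =>
    have h1 : ∀ k ∈ ks, ((((x :: t).count k : Nat)) : Int)
        = ((t.count k : Nat) : Int) + (if k = x then 1 else 0) := by
      intro k _
      rw [List.count_cons]
      by_cases h : k = x
      · subst h; simp
      · have h' : (x == k) = false := by
          simp only [beq_eq_false_iff_ne]; exact fun hh => h hh.symm
        simp [h, h']
    rw [List.map_congr_left h1, PySem.List.sum_map_add_int,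
        ih (fun y hy => hmem y (List.mem_cons_of_mem x hy))]
    have h2 : (ks.map (fun k => if k = x then (1:Int) else 0)).sum = 1 := by
      rw [List.map_congr_left (l := ks) (f := fun k => if k = x then (1:Int) else 0)
        (g := fun k => if (k == x) = true then (1:Int) else 0)
        (by intro k _; simp)]
      rw [PySem.List.sum_map_ite_one_zero]
      have : ks.countP (· == x) = ks.count x := rfl
      rw [this, List.count_eq_one_of_mem hnd (hmem x List.mem_cons_self)]
      simp
    rw [h2]
    simp only [List.length_cons]
    push_cast
    ring

-- the guarded body with counts ≥ 1 is the unguarded symmetric term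
theorem pvBody (o ca cb : Int) (ha : 1 ≤ ca) (hb : 1 ≤ cb) :
    (if 2 ≤ cb then
      (if 2 ≤ ca then o + PySem.Int.floordiv (ca * (ca - 1)) 2 * cb else o)
        + PySem.Int.floordiv (cb * (cb - 1)) 2 * ca
     else (if 2 ≤ ca then o + PySem.Int.floordiv (ca * (ca - 1)) 2 * cb else o))
    = o + (PySem.Int.floordiv (ca * (ca - 1)) 2 * cb
        + PySem.Int.floordiv (cb * (cb - 1)) 2 * ca) := by
  have hz : ∀ c : Int, 1 ≤ c → ¬ (2 ≤ c) → PySem.Int.floordiv (c * (c - 1)) 2 = 0 := by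
    intro c h1 h2
    have : c = 1 := by omega
    subst this
    decide
  by_cases h1 : 2 ≤ ca <;> by_cases h2 : 2 ≤ cb
  · rw [if_pos h2, if_pos h1]; ring
  · rw [if_neg h2, if_pos h1, hz _ hb h2]; ring
  · rw [if_pos h2, if_neg h1, hz _ ha h1]; ring
  · rw [if_neg h2, if_neg h1, hz _ ha h1, hz _ hb h2]; ring

theorem pvMain (s : String) : solution s = solution_alt s := by
  unfold solution solution_alt
  rw [PySem.Dict.foldl_insert_getD_add_one_eq_counter]
  dsimp only
  set xs := s.toList with hxs
  set ks := PySem.Set.ofList xs with hks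
  have hkeys : (PySem.Dict.counter xs).keys = ks := PySem.Dict.keys_counter xs
  rw [hkeys]
  -- B side: fold to sum over counts
  have hvals : (PySem.Dict.counter xs).values = ks.map (fun k => ((xs.count k : Nat) : Int)) := by
    rw [PySem.Dict.values, PySem.Dict.items_counter, List.map_map]
    rfl
  rw [hvals, PySem.List.foldl_add, zero_add, List.map_map]
  -- A side: remove the guards, then close the double loop
  have hbody : ∀ (output : Int), ∀ i ∈ PySem.List.pyRange 0 (PySem.List.len ks) 1,
      (PySem.List.pyRange (i + 1) (PySem.List.len ks) 1).foldl (fun output j =>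
        let a := PySem.List.pyGetD ks i ' '
        let b := PySem.List.pyGetD ks j ' '
        let count_a := (PySem.Dict.counter xs).getD a 0
        let count_b := (PySem.Dict.counter xs).getD b 0
        let output := if 2 ≤ count_a then output + PySem.Int.floordiv (count_a * (count_a - 1)) 2 * count_b else output
        if 2 ≤ count_b then output + PySem.Int.floordiv (count_b * (count_b - 1)) 2 * count_a else output)
        output
      = (PySem.List.pyRange (i + 1) (PySem.List.len ks) 1).foldl (fun output j =>
          output + ((fun a b => PySem.Int.floordiv (((xs.count a : Nat) : Int) * (((xs.count a : Nat) : Int) - 1)) 2 * ((xs.count b : Nat) : Int)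
            + PySem.Int.floordiv (((xs.count b : Nat) : Int) * (((xs.count b : Nat) : Int) - 1)) 2 * ((xs.count a : Nat) : Int))
            (PySem.List.pyGetD ks i ' ') (PySem.List.pyGetD ks j ' '))) output := by
    intro output i hi
    apply PySem.List.foldl_congr_mem
    intro acc j hj
    rw [PySem.List.mem_pyRange_one, PySem.List.len_eq] at hi hj
    have hamem : PySem.List.pyGetD ks i ' ' ∈ ks :=
      PySem.List.pyGetD_mem ks ' ' ⟨by omega, by omega⟩
    have hbmem : PySem.List.pyGetD ks j ' ' ∈ ks :=
      PySem.List.pyGetD_mem ks ' ' ⟨by omega, by omega⟩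
    simp only [PySem.Dict.getD_counter]
    have ha1 : (1 : Int) ≤ ((xs.count (PySem.List.pyGetD ks i ' ') : Nat) : Int) := by
      have := List.one_le_count_iff.mpr ((PySem.Set.mem_ofList xs _).mp hamem)
      exact_mod_cast this
    have hb1 : (1 : Int) ≤ ((xs.count (PySem.List.pyGetD ks j ' ') : Nat) : Int) := by
      have := List.one_le_count_iff.mpr ((PySem.Set.mem_ofList xs _).mp hbmem)
      exact_mod_cast this
    exact pvBody acc _ _ ha1 hb1
  rw [PySem.List.foldl_congr_mem _ _ _ _ hbody]
  rw [pvLoop_eq_pairSum (fun a b => PySem.Int.floordiv (((xs.count a : Nat) : Int) * (((xs.count a : Nat) : Int) - 1)) 2 * ((xs.count b : Nat) : Int)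
        + PySem.Int.floordiv (((xs.count b : Nat) : Int) * (((xs.count b : Nat) : Int) - 1)) 2 * ((xs.count a : Nat) : Int)) ' ' ks]
  rw [pvPairSum_counts (fun k => PySem.Int.floordiv (((xs.count k : Nat) : Int) * (((xs.count k : Nat) : Int) - 1)) 2)
        (fun k => ((xs.count k : Nat) : Int)) ks]
  have hT : (ks.map (fun k => ((xs.count k : Nat) : Int))).sum = (xs.length : Int) :=
    pvSumCounts xs ks (PySem.Set.nodup_ofList xs) (fun y hy => (PySem.Set.mem_ofList xs y).mpr hy)
  rw [hT, PySem.Str.len_eq]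
  rfl

-- ===== VERDICT (by name: the statement is the Claim_ definition above) =====
theorem solution_spec : Claim_equal_solution := by
  intro s _
  unfold Spec_solution
  exact pvMain s
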